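-- pv_equiv track=rewrite | github.com/special-linear/algebra-problems-generator | numbertheory/common.py | powers_tower_eq
-- ===== SOURCE A (Python) =====
-- def is_power(a, b):
--     ln = 0
--     while a % b == 0:
--         a = a//b
--         ln += 1
--     return bool(a == 1), ln
--
-- def powers_tower_eq(pows, s):
--     if pows and s != 0:
--         if s == 1 and (pows[0] == 1 or (len(pows) > 1 and pows[1] == 0)):
--             return True
--         else:
--             f, ln = is_power(pows[0], s)
--             if f:
--                 if len(pows) > 1:
--                     return powers_tower_eq(pows[1:], ln)
--                 else:
--                     return ln == 1
--             else:
--                 return False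
--     else:
--         return s == 0 and pows[0] == 0
-- ===== SOURCE B (Python) =====
-- def powers_tower_eq(pows, s):
--     i, n = 0, len(pows)
--     while i < n and s != 0:
--         a = pows[i]
--         if s == 1 and (a == 1 or (i + 1 < n and pows[i + 1] == 0)):
--             return True
--         # multiplicity of s in a, built multiply-up: p = s**ln
--         ln, p = 0, 1
--         while a % (p * s) == 0:
--             p *= s
--             ln += 1
--         if a != p:
--             return False
--         if i + 1 == n:
--             return ln == 1
--         i, s = i + 1, ln
--     return s == 0 and pows[i] == 0
-- ===== Notes on version B (the rewrite author's own statement) =====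
-- stated objective: alternative
-- what changed: Replaces the recursion-with-slicing by an index-based while loop over the original list, and replaces the divide-down is_power helper by an inline multiply-up multiplicity search (builds p = s**ln and compares a against p instead of repeatedly dividing a).
import Mathlib
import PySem

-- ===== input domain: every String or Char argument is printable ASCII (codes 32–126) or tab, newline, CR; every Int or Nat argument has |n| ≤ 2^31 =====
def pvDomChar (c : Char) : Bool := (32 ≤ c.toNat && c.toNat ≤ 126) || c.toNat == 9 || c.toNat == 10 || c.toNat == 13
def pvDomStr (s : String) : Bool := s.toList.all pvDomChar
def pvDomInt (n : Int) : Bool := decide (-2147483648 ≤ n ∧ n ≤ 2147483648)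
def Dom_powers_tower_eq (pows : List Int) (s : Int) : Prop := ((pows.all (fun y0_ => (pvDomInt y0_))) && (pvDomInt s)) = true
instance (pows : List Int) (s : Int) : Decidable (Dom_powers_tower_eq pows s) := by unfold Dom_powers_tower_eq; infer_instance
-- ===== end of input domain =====

-- B replaces A's recursion-with-slicing by an index-based loop and A's divide-down
-- is_power by a multiply-up multiplicity search; equal return values on Pre_ (the
-- inputs where A terminates without an exception).

-- ===== PORT A =====
-- while a % b == 0: a //= b; ln += 1   (fuel only makes the loop total; on every
-- input admitted by Pre_ the Python loop stops within 64 iterations)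
def isPowerLoop : Nat → Int → Int → Int → Bool × Int
  | 0, a, _, ln => (a == 1, ln)
  | fuel+1, a, b, ln =>
    if PySem.Int.mod a b = 0 then isPowerLoop fuel (PySem.Int.floordiv a b) b (ln + 1)
    else (a == 1, ln)

def is_power (a b : Int) : Bool × Int := isPowerLoop 64 a b 0

def powers_tower_eq : List Int → Int → Bool
  | [], s => decide (s = 0) && false
      -- `s == 0 and pows[0] == 0`: pows[0] raises IndexError when s = 0 (outside Pre_),
      -- otherwise the `and` short-circuits to False
  | a :: rest, s =>
    if s ≠ 0 then
      if s = 1 ∧ (a = 1 ∨ (rest ≠ [] ∧ rest.head? = some 0)) then true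
      else
        let fl := is_power a s
        if fl.1 then
          if rest ≠ [] then powers_tower_eq rest fl.2
          else decide (fl.2 = 1)
        else false
    else decide (s = 0 ∧ a = 0)

-- ===== PORT B =====
-- ln, p = 0, 1; while a % (p * s) == 0: p *= s; ln += 1   (fuel only makes it total)
def altMultLoop : Nat → Int → Int → Int → Int → Int × Int
  | 0, _, _, ln, p => (ln, p)
  | fuel+1, a, s, ln, p =>
    if PySem.Int.mod a (p * s) = 0 then altMultLoop fuel a s (ln + 1) (p * s)
    else (ln, p)

-- the `while i < n and s != 0` loop of Source B; fuel = len(pows) + 1 always suffices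
-- because i increases at every iteration.  `pows[i]` is in range whenever it is
-- evaluated on an input admitted by Pre_ (the `.getD 0` is only a totality guard).
def altLoop (pows : List Int) (n : Int) : Nat → Int → Int → Bool
  | 0, _, _ => false
  | fuel+1, i, s =>
    if i < n ∧ s ≠ 0 then
      let a := (PySem.List.pyGet? pows i).getD 0
      if s = 1 ∧ (a = 1 ∨ (i + 1 < n ∧ (PySem.List.pyGet? pows (i + 1)).getD 0 = 0)) then true
      else
        let lp := altMultLoop 64 a s 0 1
        if a ≠ lp.2 then false
        else if i + 1 = n then decide (lp.1 = 1)
        else altLoop pows n fuel (i + 1) lp.1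
    else decide (s = 0 ∧ (PySem.List.pyGet? pows i).getD 0 = 0)

def powers_tower_eq_alt (pows : List Int) (s : Int) : Bool :=
  altLoop pows (pows.length : Int) (pows.length + 1) 0 s

-- ===== PRECONDITION & SPEC =====
-- pyMult a s = the multiplicity of s in a (the greatest k with s^k ∣ a), for
-- a ≠ 0, |s| ≥ 2 and |a| ≤ 2^31 (the bound 40 is never reached on such inputs).
def pyMult (a s : Int) : Nat := ((List.range 40).filter (fun k => decide (s ^ (k + 1) ∣ a))).length

-- Pre_ excludes exactly the inputs on which the Python A does not return: it
-- diverges when is_power is reached with base s ∈ {-1, 0, 1} or argument 0 at some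
-- level of the tower, and raises IndexError on ([], 0).
def towerOk : List Int → Int → Bool
  | [], s => decide (s ≠ 0)
  | a :: rest, s =>
    decide (s = 0) ||
    (decide (s = 1 ∧ (a = 1 ∨ rest.head? = some 0))) ||
    (decide (2 ≤ s.natAbs) && decide (a ≠ 0) &&
      (if a = s ^ pyMult a s then (decide (rest = []) || towerOk rest (pyMult a s)) else true))

def Pre_powers_tower_eq (pows : List Int) (s : Int) : Prop := towerOk pows s = true
instance (pows : List Int) (s : Int) : Decidable (Pre_powers_tower_eq pows s) := by
  unfold Pre_powers_tower_eq; infer_instance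

def pvWitness_powers_tower_eq : List Int × Int := ([4, 2], 2)

def Spec_powers_tower_eq (pows : List Int) (s : Int) (out : Bool) : Prop := out = powers_tower_eq_alt pows s
instance (pows : List Int) (s : Int) (out : Bool) : Decidable (Spec_powers_tower_eq pows s out) := by unfold Spec_powers_tower_eq; infer_instance

-- ===== CLAIM (what is proved, stated in full; the proofs are below) =====
def Claim_equal_powers_tower_eq : Prop := ∀ (pows : List Int) (s : Int), Dom_powers_tower_eq pows s → Pre_powers_tower_eq pows s → Spec_powers_tower_eq pows s (powers_tower_eq pows s)

-- ===== LEMMAS AND PROOFS =====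

theorem pyMult_le (a s : Int) : pyMult a s ≤ 40 := by
  have := List.length_filter_le (fun k => decide (s ^ (k + 1) ∣ a)) (List.range 40)
  simpa [pyMult] using this

theorem pyMult_zero {a s : Int} (h : ¬ s ∣ a) : pyMult a s = 0 := by
  unfold pyMult
  rw [List.length_eq_zero_iff, List.filter_eq_nil_iff]
  intro k _
  simp only [decide_eq_true_eq]
  exact fun hk => h ((dvd_pow_self s (Nat.succ_ne_zero k)).trans hk)

theorem pyMult_succ {a s : Int} (hs : s ≠ 0) (hd : s ∣ a) (ha : a ≠ 0)
    (h2 : 2 ≤ s.natAbs) (hb : a.natAbs ≤ 2 ^ 31) :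
    pyMult a s = pyMult (a / s) s + 1 := by
  obtain ⟨c, hc⟩ := hd
  have hdiv : a / s = c := by rw [hc]; exact Int.mul_ediv_cancel_left c hs
  have hc0 : c ≠ 0 := by rintro rfl; simp at hc; exact ha hc
  have hcb : c.natAbs ≤ 2 ^ 31 := by
    have : c.natAbs ∣ a.natAbs := Int.natAbs_dvd_natAbs.mpr ⟨s, by rw [hc]; ring⟩
    exact le_trans (Nat.le_of_dvd (Int.natAbs_pos.mpr ha) this) hb
  have h40 : ¬ s ^ 40 ∣ c := by
    intro hdd
    have h1 : (s ^ 40).natAbs ≤ c.natAbs :=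
      Nat.le_of_dvd (Int.natAbs_pos.mpr hc0) (Int.natAbs_dvd_natAbs.mpr hdd)
    have h2' : 2 ^ 40 ≤ (s ^ 40).natAbs := by
      rw [Int.natAbs_pow]; exact Nat.pow_le_pow_left h2 40
    have : (2 : Nat) ^ 31 < 2 ^ 40 := by norm_num
    omega
  have key : ∀ k, (s ^ (k + 1) ∣ a) ↔ (s ^ k ∣ c) := by
    intro k
    rw [hc, pow_succ']
    exact mul_dvd_mul_iff_left hs
  rw [hdiv]
  unfold pyMult
  have e1 : (List.range 40).filter (fun k => decide (s ^ (k + 1) ∣ a))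
      = (List.range 40).filter (fun k => decide (s ^ k ∣ c)) := by
    apply List.filter_congr
    intro k _
    simp [key k]
  rw [e1]
  have e2 : (List.range 40) = 0 :: (List.range 39).map (· + 1) := by
    have := List.range_succ_eq_map (n := 39)
    simpa [Nat.succ_eq_add_one] using this
  have e3 : (List.range 40) = List.range 39 ++ [39] := by
    simpa using List.range_succ
  conv_lhs => rw [e2]
  conv_rhs => rw [e3]
  rw [List.filter_cons_of_pos (by simp), List.filter_append, List.filter_map]
  have e4 : List.filter ((fun k => decide (s ^ k ∣ c)) ∘ (· + 1)) (List.range 39)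
      = List.filter (fun k => decide (s ^ (k + 1) ∣ c)) (List.range 39) := rfl
  have e5 : List.filter (fun k => decide (s ^ (k + 1) ∣ c)) [39] = [] := by
    simp [h40]
  rw [e4, e5]
  simp

theorem pyMult_char {a s : Int} (ha : a ≠ 0) (h2 : 2 ≤ s.natAbs) (hb : a.natAbs ≤ 2 ^ 31) :
    ∀ k, s ^ k ∣ a ↔ k ≤ pyMult a s := by
  have hs : s ≠ 0 := by intro h; rw [h] at h2; simp at h2
  induction hN : a.natAbs using Nat.strong_induction_on generalizing a with
  | _ n IH =>
  intro k
  by_cases hd : s ∣ a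
  · obtain ⟨c, hc⟩ := hd
    have hdiv : a / s = c := by rw [hc]; exact Int.mul_ediv_cancel_left c hs
    have hc0 : c ≠ 0 := by rintro rfl; simp at hc; exact ha hc
    have hlt : c.natAbs < a.natAbs := by
      rw [hc, Int.natAbs_mul]
      have : 1 ≤ c.natAbs := Int.natAbs_pos.mpr hc0
      nlinarith
    have hcb : c.natAbs ≤ 2 ^ 31 := le_trans (le_of_lt hlt) hb
    have hrec := pyMult_succ hs ⟨c, hc⟩ ha h2 hb
    rw [hdiv] at hrec
    rw [hrec]
    cases k with
    | zero => simp
    | succ k =>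
      have : s ^ (k + 1) ∣ a ↔ s ^ k ∣ c := by
        rw [hc, pow_succ']; exact mul_dvd_mul_iff_left hs
      rw [this, IH c.natAbs (hN ▸ hlt) hc0 hcb rfl k]
      omega
  · rw [pyMult_zero hd]
    cases k with
    | zero => simp
    | succ k =>
      constructor
      · intro hk
        exact absurd ((dvd_pow_self s (Nat.succ_ne_zero k)).trans hk) hd
      · omega

theorem isPowerLoop_spec {s : Int} (h2 : 2 ≤ s.natAbs) :
    ∀ (F : Nat) (a ln : Int), a ≠ 0 → a.natAbs ≤ 2 ^ 31 → pyMult a s < F →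
    isPowerLoop F a s ln = (decide (a = s ^ pyMult a s), ln + pyMult a s) := by
  have hs : s ≠ 0 := by intro h; rw [h] at h2; simp at h2
  intro F
  induction F with
  | zero => intro a ln _ _ hF; omega
  | succ F IH =>
    intro a ln ha hb hF
    by_cases hd : s ∣ a
    · obtain ⟨c, hc⟩ := hd
      have hdiv : a / s = c := by rw [hc]; exact Int.mul_ediv_cancel_left c hs
      have hc0 : c ≠ 0 := by rintro rfl; simp at hc; exact ha hc
      have hlt : c.natAbs < a.natAbs := by
        rw [hc, Int.natAbs_mul]
        have : 1 ≤ c.natAbs := Int.natAbs_pos.mpr hc0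
        nlinarith
      have hrec := pyMult_succ hs ⟨c, hc⟩ ha h2 hb
      rw [hdiv] at hrec
      have hmod : PySem.Int.mod a s = 0 := (PySem.Int.mod_eq_zero_iff_dvd a s).mpr ⟨c, hc⟩
      have hfd : PySem.Int.floordiv a s = c := by
        have h0 : PySem.Int.floordiv a s * s + PySem.Int.mod a s = a :=
          PySem.Int.floordiv_mul_add_mod a s
        rw [hmod, add_zero] at h0
        have : PySem.Int.floordiv a s * s = c * s := by rw [h0, hc]; ring
        exact mul_right_cancel₀ hs this
      show (if PySem.Int.mod a s = 0 then isPowerLoop F (PySem.Int.floordiv a s) s (ln + 1)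
        else (a == 1, ln)) = _
      rw [if_pos hmod, hfd,
        IH c (ln + 1) hc0 (le_trans (le_of_lt hlt) hb) (by omega)]
      have heq : (a = s ^ pyMult a s) ↔ (c = s ^ pyMult c s) := by
        rw [hrec, hc, pow_succ']
        exact mul_right_inj' hs
      rw [hrec] at heq ⊢
      simp only [Prod.mk.injEq]
      refine ⟨by rw [decide_eq_decide]; exact heq.symm, by push_cast; ring⟩
    · have hmod : PySem.Int.mod a s ≠ 0 := fun h =>
        hd ((PySem.Int.mod_eq_zero_iff_dvd a s).mp h)
      show (if PySem.Int.mod a s = 0 then _ else ((a == 1 : Bool), ln)) = _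
      rw [if_neg hmod, pyMult_zero hd]
      simp only [pow_zero, Nat.cast_zero, add_zero, Prod.mk.injEq]
      refine ⟨?_, trivial⟩
      rw [Bool.eq_iff_iff, beq_iff_eq, decide_eq_true_eq]

theorem altMultLoop_spec {a s : Int} (ha : a ≠ 0) (h2 : 2 ≤ s.natAbs) (hb : a.natAbs ≤ 2 ^ 31) :
    ∀ (F j : Nat), j ≤ pyMult a s → pyMult a s - j < F →
    altMultLoop F a s (j : Int) (s ^ j) = ((pyMult a s : Int), s ^ pyMult a s) := by
  intro F
  induction F with
  | zero => intro j _ hF; omega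
  | succ F IH =>
    intro j hj hF
    have hchar := pyMult_char ha h2 hb
    show (if PySem.Int.mod a (s ^ j * s) = 0 then
        altMultLoop F a s ((j : Int) + 1) (s ^ j * s) else ((j : Int), s ^ j)) = _
    by_cases hlt : j < pyMult a s
    · have hdvd : s ^ (j + 1) ∣ a := (hchar (j + 1)).mpr (by omega)
      rw [if_pos (by rw [PySem.Int.mod_eq_zero_iff_dvd, ← pow_succ]; exact hdvd)]
      have e1 : (j : Int) + 1 = ((j + 1 : Nat) : Int) := by push_cast; ring
      have e2 : s ^ j * s = s ^ (j + 1) := (pow_succ s j).symm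
      rw [e1, e2]
      exact IH (j + 1) (by omega) (by omega)
    · have hje : j = pyMult a s := by omega
      have hndvd : ¬ s ^ (j + 1) ∣ a := fun h => by
        have := (hchar (j + 1)).mp h; omega
      rw [if_neg (by rw [PySem.Int.mod_eq_zero_iff_dvd, ← pow_succ]; exact hndvd), hje]

-- the main loop/recursion correspondence
theorem altLoop_eq_A : ∀ (rest pows : List Int) (iN : Nat) (s : Int) (fuel : Nat),
    pows.drop iN = rest → rest.length < fuel →
    pows.all (fun x => pvDomInt x) = true → towerOk rest s = true →
    altLoop pows (pows.length : Int) fuel (iN : Int) s = powers_tower_eq rest s := by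
  intro rest
  induction rest with
  | nil =>
    intro pows iN s fuel hdrop hfuel hdom hok
    have hlen : pows.length ≤ iN := List.drop_eq_nil_iff.mp hdrop
    have hs : s ≠ 0 := by simpa [towerOk] using hok
    cases fuel with
    | zero => omega
    | succ fuel =>
      show (if (iN : Int) < (pows.length : Int) ∧ s ≠ 0 then _ else
        decide (s = 0 ∧ _ = 0)) = _
      rw [if_neg (by omega)]
      simp [powers_tower_eq, hs]
  | cons a rest' IH =>
    intro pows iN s fuel hdrop hfuel hdom hok
    have hlen : iN < pows.length := by
      by_contra h
      rw [List.drop_eq_nil_iff.mpr (by omega)] at hdrop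
      exact List.cons_ne_nil a rest' hdrop.symm
    have hget : pows[iN]? = some a := by
      rw [← List.head?_drop, hdrop]; rfl
    have hmem : a ∈ pows := List.mem_of_getElem? hget
    have hdropS : pows.drop (iN + 1) = rest' := by
      have : List.drop 1 (pows.drop iN) = List.drop 1 (a :: rest') := by rw [hdrop]
      simpa [List.drop_drop, Nat.add_comm] using this
    have hgetI : (PySem.List.pyGet? pows (iN : Int)).getD 0 = a := by
      rw [PySem.List.pyGet?_natCast, hget]; rfl
    have hbound : a.natAbs ≤ 2 ^ 31 := by
      have := List.all_eq_true.mp hdom a hmem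
      simp only [pvDomInt, decide_eq_true_eq] at this
      omega
    cases fuel with
    | zero => omega
    | succ fuel =>
      by_cases hs : s = 0
      · subst hs
        show (if (iN : Int) < (pows.length : Int) ∧ (0 : Int) ≠ 0 then _ else
          decide ((0 : Int) = 0 ∧ (PySem.List.pyGet? pows (iN : Int)).getD 0 = 0)) = _
        rw [if_neg (by simp)]
        simp [powers_tower_eq, PySem.List.pyGet?_natCast, hget]
      · -- s ≠ 0
        have hcond : (iN : Int) < (pows.length : Int) ∧ s ≠ 0 := ⟨by omega, hs⟩
        -- the special s = 1 test agrees on both sides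
        have hspec_iff : (s = 1 ∧ (a = 1 ∨ ((iN : Int) + 1 < (pows.length : Int) ∧
            (PySem.List.pyGet? pows ((iN : Int) + 1)).getD 0 = 0)))
            ↔ (s = 1 ∧ (a = 1 ∨ (rest' ≠ [] ∧ rest'.head? = some 0))) := by
          constructor
          · rintro ⟨h1, h2⟩
            refine ⟨h1, ?_⟩
            rcases h2 with h2 | ⟨hlt, hz⟩
            · exact Or.inl h2
            · right
              have hlt' : iN + 1 < pows.length := by omega
              have hget2 : pows[iN + 1]? = rest'.head? := by
                rw [← List.head?_drop, hdropS]
              have e : ((iN : Int) + 1) = ((iN + 1 : Nat) : Int) := by push_cast; ring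
              rw [e, PySem.List.pyGet?_natCast, hget2] at hz
              cases hh : rest'.head? with
              | none =>
                have hnil : rest' = [] := List.head?_eq_none_iff.mp hh
                have : pows.length ≤ iN + 1 := List.drop_eq_nil_iff.mp (hnil ▸ hdropS)
                omega
              | some v =>
                rw [hh] at hz
                simp only [Option.getD_some] at hz
                subst hz
                exact ⟨by rintro rfl; simp at hh, rfl⟩
          · rintro ⟨h1, h2⟩
            refine ⟨h1, ?_⟩
            rcases h2 with h2 | ⟨hne, hz⟩
            · exact Or.inl h2
            · right
              have hlt' : iN + 1 < pows.length := by
                rcases Nat.lt_or_ge (iN + 1) pows.length with h | h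
                · exact h
                · exact absurd (by rw [← hdropS]; exact List.drop_eq_nil_iff.mpr h) hne
              refine ⟨by omega, ?_⟩
              have e : ((iN : Int) + 1) = ((iN + 1 : Nat) : Int) := by push_cast; ring
              have hget2 : pows[iN + 1]? = rest'.head? := by
                rw [← List.head?_drop, hdropS]
              rw [e, PySem.List.pyGet?_natCast, hget2, hz]
              rfl
        show (if (iN : Int) < (pows.length : Int) ∧ s ≠ 0 then _ else _) = _
        rw [if_pos hcond]
        -- A side
        have hA : powers_tower_eq (a :: rest') s =
          (if s = 1 ∧ (a = 1 ∨ (rest' ≠ [] ∧ rest'.head? = some 0)) then true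
           else
             let fl := is_power a s
             if fl.1 then
               if rest' ≠ [] then powers_tower_eq rest' fl.2
               else decide (fl.2 = 1)
             else false) := by
          conv_lhs => rw [powers_tower_eq]
          rw [if_pos hs]
        rw [hA]
        by_cases hsp : s = 1 ∧ (a = 1 ∨ (rest' ≠ [] ∧ rest'.head? = some 0))
        · rw [if_pos hsp]
          simp only [hgetI]
          rw [if_pos (hspec_iff.mpr hsp)]
        · rw [if_neg hsp]
          simp only [hgetI]
          rw [if_neg (fun h => hsp (hspec_iff.mp h))]
          -- towerOk now forces |s| ≥ 2 and a ≠ 0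
          have hok' : 2 ≤ s.natAbs ∧ a ≠ 0 ∧
              (a = s ^ pyMult a s → (rest' = [] ∨ towerOk rest' (pyMult a s) = true)) := by
            have := hok
            simp only [towerOk, Bool.or_eq_true, Bool.and_eq_true, decide_eq_true_eq] at this
            rcases this with (h | h) | ⟨⟨h1, h2⟩, h3⟩
            · exact absurd h hs
            · refine absurd ⟨h.1, ?_⟩ hsp
              rcases h.2 with h2 | h2
              · exact Or.inl h2
              · exact Or.inr ⟨by rintro rfl; simp at h2, h2⟩
            · refine ⟨h1, h2, fun he => ?_⟩
              rw [if_pos he] at h3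
              simpa using h3
          obtain ⟨h2s, ha0, himp⟩ := hok'
          set m := pyMult a s with hm
          have hip := isPowerLoop_spec h2s 64 a 0 ha0 hbound (by have := pyMult_le a s; omega)
          have hmul := altMultLoop_spec ha0 h2s hbound 64 0 (by omega)
            (by have := pyMult_le a s; omega)
          simp only [pow_zero, Nat.cast_zero] at hmul
          show (let lp := altMultLoop 64 a s 0 1;
            if a ≠ lp.2 then false
            else if (iN : Int) + 1 = (pows.length : Int) then decide (lp.1 = 1)
            else altLoop pows (pows.length : Int) fuel ((iN : Int) + 1) lp.1) = _
          rw [hmul]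
          show (if a ≠ s ^ m then false
            else if (iN : Int) + 1 = (pows.length : Int) then decide ((m : Int) = 1)
            else altLoop pows (pows.length : Int) fuel ((iN : Int) + 1) (m : Int)) = _
          rw [show is_power a s = (decide (a = s ^ m), (0 : Int) + (m : Int)) from hip]
          by_cases hf : a = s ^ m
          · rw [if_neg (by simpa using hf)]
            simp only [hf, decide_true, if_true]
            by_cases hre : rest' = []
            · subst hre
              have hlast : pows.length ≤ iN + 1 := List.drop_eq_nil_iff.mp hdropS
              rw [if_pos (by omega)]
              simp [zero_add]
            · have hrok : towerOk rest' ((m : Nat) : Int) = true := by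
                rcases himp hf with h | h
                · exact absurd h hre
                · exact h
              have hlt2 : iN + 1 < pows.length := by
                rcases Nat.lt_or_ge (iN + 1) pows.length with h | h
                · exact h
                · exact absurd (by rw [← hdropS]; exact List.drop_eq_nil_iff.mpr h) hre
              rw [if_neg (by omega), if_pos hre]
              have e : ((iN : Int) + 1) = ((iN + 1 : Nat) : Int) := by push_cast; ring
              rw [e, IH pows (iN + 1) ((m : Int)) fuel hdropS (by simp at hfuel ⊢; omega) hdom hrok]
              rw [zero_add]
          · rw [if_pos (by simpa using hf)]
            simp [hf]

-- ===== VERDICT (by name: the statement is the Claim_ definition above) =====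
theorem powers_tower_eq_spec : Claim_equal_powers_tower_eq := by
  intro pows s hdom hpre
  unfold Spec_powers_tower_eq powers_tower_eq_alt
  have hdom' : pows.all (fun x => pvDomInt x) = true := by
    unfold Dom_powers_tower_eq at hdom
    simp only [Bool.and_eq_true] at hdom
    exact hdom.1
  have := altLoop_eq_A pows pows 0 s (pows.length + 1) (by simp) (by omega) hdom' hpre
  simpa using this.symm
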